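-- pv_equiv track=rewrite | github.com/app-sre/qontract-reconcile | reconcile/change_control_automation.py | process_comments
-- ===== SOURCE A (Python) =====
-- from typing import Mapping
--
-- from typing import (
--     Any,
--     Optional,
--     Union,
-- )
-- from collections.abc import (
--     Iterable,
-- )
--
-- RECORD_ACTIONS = ["/standard"]
--
-- REQUEST_ACTIONS = ["/major"]
--
-- COMMENT_COMMANDS = """Code updates to this repository require a Change Record (standard changes) or a Change Request (major changes).
-- \n\n
-- Commands:\n\n
--
-- * /standard: create a Change Record for standard changes
-- * /major: create a Change Request for major changes"""
--
-- COMMENT_LABEL_STATES = """After applying a label command to an MR, automation will update the label to represent the current state of the associated Jira issue.\n\n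
--
-- Label states:\n\n
--
-- * cr-active (Change Record created)
-- * cr-approved (Change Request approved)
-- * cr-denied (Change Request denied)"""
--
-- def process_comments(
--     comments: Iterable[Any]
-- ) -> Mapping[str, str]:  # Improve with jira.resources.Comment type?
--     """
--     Figure out what to do next based on comments
--     This method only gets called if an existing issue state does not exist
--     Stops processing comments when a single hit happens for a given state
--     Options:
--     * Add helper comment - commands
--     * Add helper comment - state
--     * See record command
--     * See request command
--     """
--
--     output = {
--         "seen_command": False,
--         "seen_state": False,
--         "seen_act_record": False,
--         "seen_act_request": False,
--     }
--
--     for comment in comments: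
--         if not output["seen_command"] and comment["body"] == COMMENT_COMMANDS:
--             output["seen_command"] = True
--         elif not output["seen_state"] and comment["body"] == COMMENT_LABEL_STATES:
--             output["seen_state"] = True
--         elif not output["seen_act_record"] and RECORD_ACTIONS.count(
--             comment["body"]
--         ):
--             output["seen_act_record"] = True
--         elif not output["seen_act_request"] and REQUEST_ACTIONS.count(
--             comment["body"]
--         ):
--             output["seen_act_request"] = True
--
--     return output
-- ===== SOURCE B (Python) =====
-- from typing import Mapping
--
-- from typing import (
--     Any,
-- )
-- from collections.abc import (
--     Iterable,
-- )
--
-- RECORD_ACTIONS = ["/standard"]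
--
-- REQUEST_ACTIONS = ["/major"]
--
-- COMMENT_COMMANDS = """Code updates to this repository require a Change Record (standard changes) or a Change Request (major changes).
-- \n\n
-- Commands:\n\n
--
-- * /standard: create a Change Record for standard changes
-- * /major: create a Change Request for major changes"""
--
-- COMMENT_LABEL_STATES = """After applying a label command to an MR, automation will update the label to represent the current state of the associated Jira issue.\n\n
--
-- Label states:\n\n
--
-- * cr-active (Change Record created)
-- * cr-approved (Change Request approved)
-- * cr-denied (Change Request denied)"""
--
--
-- def process_comments(
--     comments: Iterable[Any]
-- ) -> Mapping[str, str]: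
--     """Since the four sentinel bodies are distinct and flag-setting is
--     idempotent, the stateful elif cascade reduces to four independent
--     membership tests over the comment bodies."""
--     bodies = [comment["body"] for comment in comments]
--     return {
--         "seen_command": COMMENT_COMMANDS in bodies,
--         "seen_state": COMMENT_LABEL_STATES in bodies,
--         "seen_act_record": RECORD_ACTIONS[0] in bodies,
--         "seen_act_request": REQUEST_ACTIONS[0] in bodies,
--     }
-- ===== Notes on version B (the rewrite author's own statement) =====
-- stated objective: idiomatic
-- what changed: Replaces A's stateful if/elif guard cascade mutating a flag dict with a single build of the bodies list and four independent membership tests (valid because the four sentinel bodies are distinct and flag-setting is idempotent).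
import Mathlib
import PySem

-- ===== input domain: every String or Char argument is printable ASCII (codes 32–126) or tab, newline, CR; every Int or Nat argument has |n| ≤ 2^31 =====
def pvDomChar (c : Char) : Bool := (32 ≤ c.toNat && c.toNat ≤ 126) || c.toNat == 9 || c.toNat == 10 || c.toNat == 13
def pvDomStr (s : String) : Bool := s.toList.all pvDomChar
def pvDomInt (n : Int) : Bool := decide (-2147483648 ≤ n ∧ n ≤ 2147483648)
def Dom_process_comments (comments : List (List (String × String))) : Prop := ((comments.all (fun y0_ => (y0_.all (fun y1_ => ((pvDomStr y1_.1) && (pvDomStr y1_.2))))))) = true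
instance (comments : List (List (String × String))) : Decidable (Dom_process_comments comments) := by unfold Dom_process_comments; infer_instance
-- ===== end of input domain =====

-- B replaces A's stateful if/elif cascade over one growing dict with four
-- independent membership tests over the list of comment bodies (idiomatic).

-- shared module-level constants
def pcRECORD_ACTIONS : List String := ["/standard"]
def pcREQUEST_ACTIONS : List String := ["/major"]
def pcCOMMENT_COMMANDS : String := "Code updates to this repository require a Change Record (standard changes) or a Change Request (major changes).\n\n\n\nCommands:\n\n\n\n* /standard: create a Change Record for standard changes\n* /major: create a Change Request for major changes"
def pcCOMMENT_LABEL_STATES : String := "After applying a label command to an MR, automation will update the label to represent the current state of the associated Jira issue.\n\n\n\nLabel states:\n\n\n\n* cr-active (Change Record created)\n* cr-approved (Change Request approved)\n* cr-denied (Change Request denied)"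

-- ===== PORT A =====
-- one loop step: the if/elif cascade of A ('none' = KeyError on comment["body"], excluded by Pre_)
def pcStepA (output : PySem.Dict String Bool) (comment : List (String × String)) : PySem.Dict String Bool :=
  match (PySem.Dict.mk comment).get? "body" with
  | none => output
  | some body =>
    if !(output.getD "seen_command" false) && body == pcCOMMENT_COMMANDS then
      output.insert "seen_command" true
    else if !(output.getD "seen_state" false) && body == pcCOMMENT_LABEL_STATES then
      output.insert "seen_state" true
    else if !(output.getD "seen_act_record" false) && (PySem.List.count pcRECORD_ACTIONS body != 0) then
      output.insert "seen_act_record" true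
    else if !(output.getD "seen_act_request" false) && (PySem.List.count pcREQUEST_ACTIONS body != 0) then
      output.insert "seen_act_request" true
    else output

def process_comments (comments : List (List (String × String))) : List (String × Bool) :=
  let output : PySem.Dict String Bool := PySem.Dict.mk
    [("seen_command", false), ("seen_state", false), ("seen_act_record", false), ("seen_act_request", false)]
  (comments.foldl pcStepA output).items

-- ===== PORT B =====
def process_comments_alt (comments : List (List (String × String))) : List (String × Bool) :=
  let bodies : List (Option String) := comments.map (fun comment => (PySem.Dict.mk comment).get? "body")
  [("seen_command", bodies.contains (some pcCOMMENT_COMMANDS)),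
   ("seen_state", bodies.contains (some pcCOMMENT_LABEL_STATES)),
   ("seen_act_record", bodies.contains ((PySem.List.pyGet? pcRECORD_ACTIONS 0))),
   ("seen_act_request", bodies.contains ((PySem.List.pyGet? pcREQUEST_ACTIONS 0)))]

-- ===== PRECONDITION & SPEC =====
-- Pre_ excludes exactly the comments lacking a "body" key, on which Python A (and B) raise KeyError.
def Pre_process_comments (comments : List (List (String × String))) : Prop :=
  (comments.all (fun comment => ((PySem.Dict.mk comment).get? "body").isSome)) = true
instance (comments : List (List (String × String))) : Decidable (Pre_process_comments comments) := by unfold Pre_process_comments; infer_instance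
def pvWitness_process_comments : (List (List (String × String))) := [[("body", "/standard")], [("body", "hello")]]

def Spec_process_comments (comments : List (List (String × String))) (out : List (String × Bool)) : Prop := out = process_comments_alt comments
instance (comments : List (List (String × String))) (out : List (String × Bool)) : Decidable (Spec_process_comments comments out) := by unfold Spec_process_comments; infer_instance

-- ===== CLAIM (what is proved, stated in full; the proofs are below) =====
def Claim_equal_process_comments : Prop := ∀ (comments : List (List (String × String))), Dom_process_comments comments → Pre_process_comments comments → Spec_process_comments comments (process_comments comments)

-- ===== LEMMAS AND PROOFS =====


-- the if/elif cascade on a comment whose "body" is present sets each flag to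
-- (old ∨ body-matches-its-sentinel); the guards are redundant because the four
-- sentinels are pairwise distinct strings
set_option maxRecDepth 8192 in
theorem pcStepA_some (b1 b2 b3 b4 : Bool) (c : List (String × String)) (body : String)
    (h : (PySem.Dict.mk c).get? "body" = some body) :
    pcStepA (PySem.Dict.mk [("seen_command", b1), ("seen_state", b2), ("seen_act_record", b3), ("seen_act_request", b4)]) c =
    PySem.Dict.mk [("seen_command", b1 || (body == pcCOMMENT_COMMANDS)),
                   ("seen_state", b2 || (body == pcCOMMENT_LABEL_STATES)),
                   ("seen_act_record", b3 || (body == "/standard")),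
                   ("seen_act_request", b4 || (body == "/major"))] := by
  unfold pcStepA
  rw [h]
  by_cases h1 : body = pcCOMMENT_COMMANDS
  · subst h1; rcases b1 <;> rcases b2 <;> rcases b3 <;> rcases b4 <;> decide
  · by_cases h2 : body = pcCOMMENT_LABEL_STATES
    · subst h2; rcases b1 <;> rcases b2 <;> rcases b3 <;> rcases b4 <;> decide
    · by_cases h3 : body = "/standard"
      · subst h3; rcases b1 <;> rcases b2 <;> rcases b3 <;> rcases b4 <;> decide
      · by_cases h4 : body = "/major"
        · subst h4; rcases b1 <;> rcases b2 <;> rcases b3 <;> rcases b4 <;> decide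
        · simp [h1, h2, h3, h4, Ne.symm h3, Ne.symm h4, pcRECORD_ACTIONS, pcREQUEST_ACTIONS, PySem.List.count]

-- did any comment's body equal s?
def pcHit (comments : List (List (String × String))) (s : String) : Bool :=
  comments.any (fun c => (PySem.Dict.mk c).get? "body" == some s)

theorem pcFold_spec : ∀ (cs : List (List (String × String))) (b1 b2 b3 b4 : Bool),
    (cs.all (fun comment => ((PySem.Dict.mk comment).get? "body").isSome)) = true →
    cs.foldl pcStepA (PySem.Dict.mk [("seen_command", b1), ("seen_state", b2), ("seen_act_record", b3), ("seen_act_request", b4)]) =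
    PySem.Dict.mk [("seen_command", b1 || pcHit cs pcCOMMENT_COMMANDS),
                   ("seen_state", b2 || pcHit cs pcCOMMENT_LABEL_STATES),
                   ("seen_act_record", b3 || pcHit cs "/standard"),
                   ("seen_act_request", b4 || pcHit cs "/major")] := by
  intro cs
  induction cs with
  | nil => intro b1 b2 b3 b4 _; simp [pcHit]
  | cons c cs ih =>
    intro b1 b2 b3 b4 hpre
    simp only [List.all_cons, Bool.and_eq_true] at hpre
    obtain ⟨hc, hcs⟩ := hpre
    cases h : (PySem.Dict.mk c).get? "body" with
    | none => rw [h] at hc; simp at hc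
    | some body =>
      rw [List.foldl_cons, pcStepA_some _ _ _ _ _ _ h, ih _ _ _ _ hcs]
      simp [pcHit, List.any_cons, h, Bool.or_assoc]

-- ===== VERDICT =====
theorem process_comments_spec : Claim_equal_process_comments := by
  intro comments _hdom hpre
  unfold Spec_process_comments
  simp only [process_comments, process_comments_alt]
  rw [pcFold_spec comments false false false false hpre]
  simp [pcHit, PySem.List.pyGet?, pcRECORD_ACTIONS, pcREQUEST_ACTIONS, PySem.List.pyIdx?]
  refine ⟨?_, ?_, ?_, ?_⟩ <;> (rw [Bool.eq_iff_iff]; simp [List.any_eq_true])
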